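-- pv_equiv track=rewrite | github.com/oscar2song/docforge | docforge/pdf/pdf_splitter.py | _calculate_page_ranges
-- ===== SOURCE A (Python) =====
-- from typing import List, Dict, Optional, Union, Tuple
--
-- def _calculate_page_ranges(start_pages: List[int], total_pages: int) -> List[Tuple[int, int]]:
--     """Calculate page ranges from start pages."""
--     page_ranges = []
--
--     for i, start in enumerate(start_pages):
--         if i == len(start_pages) - 1:
--             end = total_pages
--         else:
--             end = start_pages[i + 1] - 1
--         page_ranges.append((start, end))
--
--     return page_ranges
-- ===== SOURCE B (Python) =====
-- def _calculate_page_ranges(start_pages, total_pages):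
--     result = []
--     end = total_pages
--     for start in reversed(start_pages):
--         result.append((start, end))
--         end = start - 1
--     result.reverse()
--     return result
-- ===== Notes on version B (the rewrite author's own statement) =====
-- stated objective: alternative
-- what changed: Traverses the start pages in reverse carrying the current end boundary as an accumulator (end := start - 1 after each step), building the result back-to-front and reversing it, so there is no index arithmetic, no lookahead at start_pages[i+1] and no last-element branch.
import Mathlib
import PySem

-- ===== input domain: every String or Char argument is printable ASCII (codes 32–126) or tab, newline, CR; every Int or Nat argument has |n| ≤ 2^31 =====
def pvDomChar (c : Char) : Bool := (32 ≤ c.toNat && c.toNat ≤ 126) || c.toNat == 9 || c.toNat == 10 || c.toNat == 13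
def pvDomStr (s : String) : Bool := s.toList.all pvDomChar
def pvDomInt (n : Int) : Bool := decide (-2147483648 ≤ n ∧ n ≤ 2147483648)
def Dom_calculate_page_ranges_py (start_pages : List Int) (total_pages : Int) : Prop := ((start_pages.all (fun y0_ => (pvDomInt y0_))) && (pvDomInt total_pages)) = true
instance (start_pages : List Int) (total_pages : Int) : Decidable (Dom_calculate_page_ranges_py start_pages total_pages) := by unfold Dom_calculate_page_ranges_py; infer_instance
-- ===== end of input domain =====

-- B traverses the start pages in reverse with a carried end-boundary accumulator,
-- building the result back-to-front and reversing it: no index lookahead, no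
-- last-element branch (objective: alternative).


-- ===== PORT A =====
-- 'for i, start in enumerate(start_pages): … page_ranges.append((start, end))'
-- start_pages[i + 1] is read only when i < len - 1, so pyGetD's default is never used.
def calculate_page_ranges_py (start_pages : List Int) (total_pages : Int) : List (Int × Int) :=
  (PySem.List.enumerate start_pages).foldl
    (fun page_ranges p =>
      let «end» : Int :=
        if p.1 = (start_pages.length : Int) - 1 then total_pages
        else PySem.List.pyGetD start_pages (p.1 + 1) 0 - 1
      page_ranges ++ [(p.2, «end»)]) []

-- ===== PORT B =====
-- result = []; end = total_pages
-- for start in reversed(start_pages): result.append((start, end)); end = start - 1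
-- result.reverse(); return result
def calculate_page_ranges_py_alt (start_pages : List Int) (total_pages : Int) : List (Int × Int) :=
  let st := start_pages.reverse.foldl
    (fun (acc : List (Int × Int) × Int) start => (acc.1 ++ [(start, acc.2)], start - 1))
    ([], total_pages)
  st.1.reverse

-- ===== PRECONDITION & SPEC =====
def Spec_calculate_page_ranges_py (start_pages : List Int) (total_pages : Int) (out : List (Int × Int)) : Prop := out = calculate_page_ranges_py_alt start_pages total_pages
instance (start_pages : List Int) (total_pages : Int) (out : List (Int × Int)) : Decidable (Spec_calculate_page_ranges_py start_pages total_pages out) := by unfold Spec_calculate_page_ranges_py; infer_instance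

-- ===== CLAIM (what is proved, stated in full; the proofs are below) =====
def Claim_equal_calculate_page_ranges_py : Prop := ∀ (start_pages : List Int) (total_pages : Int), Dom_calculate_page_ranges_py start_pages total_pages → Spec_calculate_page_ranges_py start_pages total_pages (calculate_page_ranges_py start_pages total_pages)

-- ===== LEMMAS AND PROOFS =====
-- Common closed form: each start is zipped with the shifted boundary list.
def pvZipForm (start_pages : List Int) (total_pages : Int) : List (Int × Int) :=
  start_pages.zip ((start_pages.drop 1).map (fun s => s - 1) ++ [total_pages])

-- A equals the closed form (index-wise).
theorem a_eq_zipForm (start_pages : List Int) (total_pages : Int) :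
    calculate_page_ranges_py start_pages total_pages = pvZipForm start_pages total_pages := by
  unfold calculate_page_ranges_py pvZipForm
  rw [PySem.List.foldl_append_singleton_eq_map, List.nil_append]
  apply List.ext_getElem
  · simp [PySem.List.length_enumerate, Nat.min_def]
    omega
  · intro k hk₁ hk₂
    simp only [List.getElem_map, PySem.List.getElem_enumerate, List.getElem_zip]
    simp [PySem.List.length_enumerate] at hk₁ hk₂
    by_cases h : k = start_pages.length - 1
    · have : ((0:Int) + k) = (start_pages.length : Int) - 1 := by omega
      simp [h, List.length_map]
      omega
    · have hlt : k < start_pages.length - 1 := by omega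
      have hne : ¬ ((0:Int) + k = (start_pages.length : Int) - 1) := by omega
      have hidx : ((0:Int) + k + 1) = ((k + 1 : Nat) : Int) := by push_cast; ring
      simp only [hne, if_false, hidx, PySem.List.pyGetD_natCast]
      have hk1 : k + 1 < start_pages.length := by omega
      simp [List.getD_eq_getElem?_getD, List.getElem?_eq_getElem hk1, List.length_map, hlt]

-- B's fold appends onto whatever accumulator it starts with.
theorem b_fold_acc (l : List Int) (acc : List (Int × Int)) (e : Int) :
    (l.foldl (fun (a : List (Int × Int) × Int) start => (a.1 ++ [(start, a.2)], start - 1)) (acc, e))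
      = ((l.foldl (fun (a : List (Int × Int) × Int) start => (a.1 ++ [(start, a.2)], start - 1)) ([], e)).1.map id |> (acc ++ ·),
         (l.foldl (fun (a : List (Int × Int) × Int) start => (a.1 ++ [(start, a.2)], start - 1)) ([], e)).2) := by
  induction l generalizing acc e with
  | nil => simp
  | cons x xs ih =>
    simp only [List.foldl_cons, List.nil_append]
    rw [ih (acc ++ [(x, e)]), ih [(x, e)]]
    simp

-- B equals the closed form, by induction from the back.
theorem b_eq_zipForm (start_pages : List Int) (total_pages : Int) :
    calculate_page_ranges_py_alt start_pages total_pages = pvZipForm start_pages total_pages := by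
  induction start_pages using List.reverseRecOn generalizing total_pages with
  | nil => simp [calculate_page_ranges_py_alt, pvZipForm]
  | append_singleton xs x ih =>
    unfold calculate_page_ranges_py_alt at ih ⊢
    simp only [List.reverse_append, List.reverse_cons, List.reverse_nil, List.nil_append] at ih ⊢
    rw [List.singleton_append, List.foldl_cons]
    dsimp only
    rw [List.nil_append, b_fold_acc]
    simp only [List.map_id, List.reverse_cons, List.nil_append, List.cons_append]
    rw [ih (x - 1)]
    -- now show pvZipForm xs (x-1) ++ [(x, total_pages)] = pvZipForm (xs ++ [x]) total_pages
    unfold pvZipForm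
    cases xs with
    | nil => simp
    | cons y ys =>
      have hlen : (y :: ys).length = (ys.map (fun s => s - 1) ++ [x - 1]).length := by
        simp
      simp only [List.drop_one, List.tail_cons, List.map_append, List.map_cons, List.map_nil,
        List.append_assoc, List.cons_append]
      rw [show y :: (ys ++ [x]) = (y :: ys) ++ [x] from rfl,
        show ys.map (fun s => s - 1) ++ (x - 1) :: ([] ++ [total_pages])
              = (ys.map (fun s => s - 1) ++ [x - 1]) ++ [total_pages] from by simp,
        List.zip_append hlen]
      simp

-- ===== VERDICT (by name: the statement is the Claim_ definition above) =====
theorem calculate_page_ranges_py_spec : Claim_equal_calculate_page_ranges_py := by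
  intro sp tp _
  unfold Spec_calculate_page_ranges_py
  rw [a_eq_zipForm, b_eq_zipForm]
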